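-- pv_equiv track=rewrite | github.com/netra-systems/zen | netra_backend/app/agents/data_sub_agent/data_processing_operations.py | _group_by_hour
-- ===== SOURCE A (Python) =====
-- from typing import Dict, List, Optional, Any
--
-- def _group_by_hour(data: List[Dict]) -> Dict[int, List[int]]:
--     """Group data by hour pattern."""
--     hourly_data = {}
--     for i, item in enumerate(data):
--         hour = i % 24
--         if hour not in hourly_data:
--             hourly_data[hour] = []
--         hourly_data[hour].append(item.get('event_count', 0))
--     return hourly_data
-- ===== SOURCE B (Python) =====
-- def _group_by_hour(data):
--     """Group data by hour pattern (hour-major strided gather instead of a sequential bucketing pass)."""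
--     hourly_data = {}
--     for hour in range(min(len(data), 24)):
--         hourly_data[hour] = [data[i].get('event_count', 0) for i in range(hour, len(data), 24)]
--     return hourly_data
-- ===== Notes on version B (the rewrite author's own statement) =====
-- stated objective: alternative
-- what changed: Replaces the single sequential pass that buckets index i into a dict by i % 24 (with a membership test per element) with an hour-major loop over range(min(len(data),24)) that builds each hour's bucket directly as a strided gather range(hour, len(data), 24).
import Mathlib
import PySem

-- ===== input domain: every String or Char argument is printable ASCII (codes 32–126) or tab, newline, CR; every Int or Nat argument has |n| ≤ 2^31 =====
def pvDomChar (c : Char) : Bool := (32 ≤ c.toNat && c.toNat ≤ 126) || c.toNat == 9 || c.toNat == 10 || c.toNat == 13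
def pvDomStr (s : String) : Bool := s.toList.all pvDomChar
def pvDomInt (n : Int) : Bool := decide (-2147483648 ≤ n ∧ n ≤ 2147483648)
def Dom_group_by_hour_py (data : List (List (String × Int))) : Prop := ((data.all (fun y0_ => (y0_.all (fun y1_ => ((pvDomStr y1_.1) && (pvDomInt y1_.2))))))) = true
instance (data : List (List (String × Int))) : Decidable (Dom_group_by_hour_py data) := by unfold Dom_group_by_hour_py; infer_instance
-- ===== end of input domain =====

-- B groups by hour with an hour-major loop over range(min(len,24)) gathering each bucket by the stride
-- range(hour, len, 24), instead of A's sequential pass bucketing index i into a dict by i % 24 (alternative, same cost).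

-- ===== PORT A =====
-- item.get('event_count', 0) (shared by both ports)
def pvVal (item : List (String × Int)) : Int := (PySem.Dict.mk item).getD "event_count" 0

-- one iteration of A's loop body
def pvStepA (d : PySem.Dict Int (List Int)) (p : Int × List (String × Int)) : PySem.Dict Int (List Int) :=
  let hour := PySem.Int.mod p.1 24
  let d' := if d.contains hour then d else d.insert hour ([] : List Int)
  d'.modify hour [] (fun l => l ++ [pvVal p.2])   -- hourly_data[hour].append(…): key is present, so dflt [] is never used

def group_by_hour_py (data : List (List (String × Int))) : List (Int × List Int) :=
  ((PySem.List.enumerate data).foldl pvStepA PySem.Dict.empty).items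

-- ===== PORT B =====
def group_by_hour_py_alt (data : List (List (String × Int))) : List (Int × List Int) :=
  ((List.range (min data.length 24)).foldl
    (fun d h => d.insert (h : Int)
      ((PySem.List.pyRange (h : Int) (data.length : Int) 24).map
        (fun i => pvVal (PySem.List.pyGetD data i []))))   -- data[i]: i is always in range, pyGetD's default is never used
    PySem.Dict.empty).items

-- ===== PRECONDITION & SPEC =====
def Spec_group_by_hour_py (data : List (List (String × Int))) (out : List (Int × List Int)) : Prop := out = group_by_hour_py_alt data
instance (data : List (List (String × Int))) (out : List (Int × List Int)) : Decidable (Spec_group_by_hour_py data out) := by unfold Spec_group_by_hour_py; infer_instance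

-- ===== CLAIM (what is proved, stated in full; the proofs are below) =====
def Claim_equal_group_by_hour_py : Prop := ∀ (data : List (List (String × Int))), Dom_group_by_hour_py data → Spec_group_by_hour_py data (group_by_hour_py data)

-- ===== LEMMAS AND PROOFS =====

-- number of indices i < n with i % 24 = h (for h < 24)
def pvCnt (h n : Nat) : Nat := if h < n then (n - h + 23) / 24 else 0

-- the bucket for hour h: values at indices h, h+24, h+48, ...
def pvCol (h : Nat) (data : List (List (String × Int))) : List Int :=
  (List.range (pvCnt h data.length)).map (fun k => pvVal (data.getD (h + 24 * k) []))

-- the common closed form of both results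
def pvMap (data : List (List (String × Int))) : List (Int × List Int) :=
  (List.range (min data.length 24)).map (fun (h : Nat) => ((h : Int), pvCol h data))

lemma pvCnt_succ (h n : Nat) (hh : h < 24) :
    pvCnt h (n + 1) = pvCnt h n + (if n % 24 = h then 1 else 0) := by
  unfold pvCnt; split_ifs <;> omega

lemma pv_index_lt {h n k : Nat} (hk : k < pvCnt h n) : h + 24 * k < n := by
  unfold pvCnt at hk; split_ifs at hk <;> omega

lemma pvCol_append (h : Nat) (hh : h < 24) (xs : List (List (String × Int))) (x : List (String × Int)) :
    pvCol h (xs ++ [x]) = pvCol h xs ++ (if xs.length % 24 = h then [pvVal x] else []) := by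
  have hn : (xs ++ [x]).length = xs.length + 1 := by simp
  unfold pvCol
  rw [hn, pvCnt_succ h xs.length hh]
  have hold : ∀ k ∈ List.range (pvCnt h xs.length),
      pvVal ((xs ++ [x]).getD (h + 24 * k) []) = pvVal (xs.getD (h + 24 * k) []) := by
    intro k hk
    rw [List.getD_append _ _ _ _ (pv_index_lt (List.mem_range.mp hk))]
  by_cases hc : xs.length % 24 = h
  · rw [if_pos hc, if_pos hc, List.range_succ, List.map_append]
    congr 1
    · exact List.map_congr_left hold
    · have he : h + 24 * pvCnt h xs.length = xs.length := by
        unfold pvCnt; split_ifs <;> omega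
      simp only [List.map_cons, List.map_nil]
      rw [he, List.getD_append_right _ _ _ _ le_rfl]
      simp
  · rw [if_neg hc, if_neg hc, add_zero]
    exact (List.map_congr_left hold).trans (by simp)

lemma pv_enumerate_append {α : Type} (xs : List α) (x : α) (s : Int) :
    PySem.List.enumerate (xs ++ [x]) s = PySem.List.enumerate xs s ++ [(s + xs.length, x)] := by
  induction xs generalizing s with
  | nil => simp [PySem.List.enumerate]
  | cons y ys ih => simp [PySem.List.enumerate, ih]; omega

lemma pv_keys_nodup (data : List (List (String × Int))) :
    ((PySem.Dict.mk (pvMap data)).keys).Nodup := by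
  rw [PySem.Dict.keys_mk]
  unfold pvMap
  rw [List.map_map]
  exact List.Nodup.map (fun a b hab => by simpa using hab) List.nodup_range

lemma pv_cnt_cast (h n : Nat) :
    (if (h:Int) < (n:Int) then (((n:Int) - (h:Int) + 24 - 1) / 24).toNat else 0) = pvCnt h n := by
  unfold pvCnt; split_ifs <;> omega

lemma pv_alt_eq (data : List (List (String × Int))) : group_by_hour_py_alt data = pvMap data := by
  unfold group_by_hour_py_alt pvMap
  rw [PySem.Dict.items_foldl_insert_fresh (List.range (min data.length 24))
        (fun (h : Nat) => (h : Int)) _ _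
        (fun a _ => PySem.Dict.contains_empty _)
        (List.Nodup.map (fun a b hab => by exact_mod_cast hab) List.nodup_range)]
  simp only [PySem.Dict.empty, List.nil_append]
  apply List.map_congr_left
  intro h hh
  have h24 : h < 24 := by have := List.mem_range.mp hh; omega
  rw [PySem.List.pyRange_of_pos _ _ (by norm_num : (0:Int) < 24), List.map_map]
  refine congrArg _ ?_
  rw [pv_cnt_cast]
  unfold pvCol
  apply List.map_congr_left
  intro k _
  have : ((h:Int) + 24 * (k:Int)) = ((h + 24 * k : Nat) : Int) := by push_cast; ring
  simp only [Function.comp, this, PySem.List.pyGetD_natCast]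

lemma pv_dictA_eq (data : List (List (String × Int))) :
    (PySem.List.enumerate data).foldl pvStepA PySem.Dict.empty = PySem.Dict.mk (pvMap data) := by
  induction data using List.reverseRecOn with
  | nil => rfl
  | append_singleton xs x ih =>
    rw [show PySem.List.enumerate (xs ++ [x]) = PySem.List.enumerate (xs ++ [x]) 0 from rfl,
        pv_enumerate_append, List.foldl_append]
    rw [show PySem.List.enumerate xs 0 = PySem.List.enumerate xs from rfl, ih]
    set n := xs.length with hn
    have hmod : PySem.Int.mod ((0:Int) + (n:Int)) 24 = ((n % 24 : Nat) : Int) := by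
      rw [PySem.Int.mod_eq_emod_of_pos (by norm_num)]; omega
    unfold pvStepA
    simp only [List.foldl_cons, List.foldl_nil, hmod]
    by_cases hbig : 24 ≤ n
    · -- key already present
      have hmem : (((n % 24 : Nat) : Int), pvCol (n % 24) xs) ∈ pvMap xs := by
        unfold pvMap
        exact List.mem_map.mpr ⟨n % 24, List.mem_range.mpr (by omega), rfl⟩
      have hcont : (PySem.Dict.mk (pvMap xs)).contains ((n % 24 : Nat) : Int) = true := by
        rw [PySem.Dict.contains_mk]
        exact List.any_eq_true.mpr ⟨_, hmem, by simp⟩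
      rw [if_pos hcont]
      unfold PySem.Dict.modify
      have hg : (PySem.Dict.mk (pvMap xs)).getD ((n % 24 : Nat) : Int) [] = pvCol (n % 24) xs :=
        PySem.Dict.getD_of_mem_items _ hmem (pv_keys_nodup xs) []
      simp only [hg]
      apply PySem.Dict.ext
      rw [PySem.Dict.items_insert_of_contains _ _ hcont]
      show List.map _ (pvMap xs) = (PySem.Dict.mk (pvMap (xs ++ [x]))).items
      show List.map _ (pvMap xs) = pvMap (xs ++ [x])
      unfold pvMap
      rw [List.map_map]
      have hmin : min n 24 = 24 := by omega
      have hmin' : min (xs ++ [x]).length 24 = 24 := by simp [← hn]; omega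
      rw [hmin, hmin']
      apply List.map_congr_left
      intro h hh
      have h24 : h < 24 := List.mem_range.mp hh
      simp only [Function.comp]
      rw [pvCol_append h h24]
      by_cases he : h = n % 24
      · subst he
        simp
        omega
      · have : ¬ (n % 24 = h) := fun c => he c.symm
        rw [if_neg this]
        simp only [beq_iff_eq, Int.natCast_inj]
        rw [if_neg he, List.append_nil]
    · -- fresh key n (= n % 24)
      have hnm : n % 24 = n := Nat.mod_eq_of_lt (by omega)
      have hcont : (PySem.Dict.mk (pvMap xs)).contains ((n % 24 : Nat) : Int) = false := by
        rw [PySem.Dict.contains_mk]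
        apply List.any_eq_false.mpr
        intro p hp
        unfold pvMap at hp
        obtain ⟨h, hh, rfl⟩ := List.mem_map.mp hp
        have := List.mem_range.mp hh
        simp only [beq_iff_eq, Int.natCast_inj, hnm]
        omega
      have hif : ¬ ((PySem.Dict.mk (pvMap xs)).contains ((n % 24 : Nat) : Int) = true) := by
        rw [hcont]; exact Bool.false_ne_true
      rw [if_neg hif]
      unfold PySem.Dict.modify
      rw [PySem.Dict.getD_insert_self, PySem.Dict.insert_insert_self]
      apply PySem.Dict.ext
      have hcont' : (PySem.Dict.mk (pvMap xs)).contains ((n % 24 : Nat) : Int) = false := hcont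
      rw [PySem.Dict.items_insert_of_not_contains _ _ hcont']
      show pvMap xs ++ _ = pvMap (xs ++ [x])
      unfold pvMap
      have hmin : min n 24 = n := by omega
      have hmin' : min (xs ++ [x]).length 24 = n + 1 := by simp [← hn]; omega
      rw [hmin, hmin', List.range_succ, List.map_append]
      congr 1
      · apply List.map_congr_left
        intro h hh
        have h24 : h < n := List.mem_range.mp hh
        rw [pvCol_append h (by omega), if_neg (by omega), List.append_nil]
      · simp only [List.map_cons, List.map_nil, hnm]
        rw [pvCol_append n (by omega), if_pos hnm]
        have : pvCol n xs = [] := by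
          unfold pvCol pvCnt
          rw [← hn, if_neg (by omega)]
          simp
        rw [this, List.nil_append]

-- ===== VERDICT (by name: the statement is the Claim_ definition above) =====
theorem group_by_hour_py_spec : Claim_equal_group_by_hour_py := by
  intro data _
  show group_by_hour_py data = group_by_hour_py_alt data
  rw [pv_alt_eq, group_by_hour_py, pv_dictA_eq]
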